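-- pv_equiv track=rewrite | github.com/tanupriya9102/Aditya-Verma-Playlists | Recursion/Print_Subsets.py | solve
-- ===== SOURCE A (Python) =====
-- def solve(ip, op):
--     result = []
--     if len(ip) == 0:
--         result.append(op)
--         return result  # Return the result immediately when the input is empty
--
--     op1 = op
--     op2 = op + ip[0]
--     ip = ip[1:]  # Update the input by excluding the first character
--
--     result += solve(ip, op1)  # Update the result by adding the recursive results
--     result += solve(ip, op2)
--
--     return result
-- ===== SOURCE B (Python) =====
-- def solve(ip, op):
--     n = len(ip)
--     result = []
--     for i in range(2 ** n):
--         res = op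
--         for j in range(n):
--             if (i >> (n - 1 - j)) & 1:
--                 res += ip[j]
--         result.append(res)
--     return result
-- ===== Notes on version B (the rewrite author's own statement) =====
-- stated objective: alternative
-- what changed: Replaced A's exclude/include recursion over the string suffix by an iterative bitmask enumeration: one loop over i in range(2**n) builds each subset string directly from the bits of i (ip[0] as the most significant bit), producing the same list in the same order without recursion.
import Mathlib
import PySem

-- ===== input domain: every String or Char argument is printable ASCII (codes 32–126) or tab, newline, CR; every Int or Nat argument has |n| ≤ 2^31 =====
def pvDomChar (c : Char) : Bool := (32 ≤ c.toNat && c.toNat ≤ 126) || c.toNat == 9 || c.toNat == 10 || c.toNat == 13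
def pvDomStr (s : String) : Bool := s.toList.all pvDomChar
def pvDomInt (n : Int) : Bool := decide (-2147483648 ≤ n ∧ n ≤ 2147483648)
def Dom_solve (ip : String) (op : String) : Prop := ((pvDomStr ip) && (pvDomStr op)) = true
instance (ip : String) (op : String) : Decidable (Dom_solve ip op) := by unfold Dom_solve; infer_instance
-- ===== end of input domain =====

-- B replaces A's exclude/include recursion by an iterative bitmask enumeration of the
-- 2^n subsets (same output list, same order); objective: alternative algorithm, same cost.

-- ===== PORT A =====
-- A's recursion, on the character list of ip (ip[0] = head, ip[1:] = tail, op + ip[0] = op ++ [c]).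
def solveAux : List Char → List Char → List (List Char)
  | [], op => [op]
  | c :: rest, op => solveAux rest op ++ solveAux rest (op ++ [c])

def solve (ip : String) (op : String) : List String :=
  (solveAux ip.toList op.toList).map String.mk

-- ===== PORT B =====
-- inner loop of Source B: res = op; for j in range(n): if (i >> (n-1-j)) & 1: res += ip[j]
-- (ip[j] is ported as cs.getD j default; exact since j < n = cs.length on every iteration).
def bfold (cs : List Char) (n : Nat) (i : Nat) (acc : List Char) : List Char :=
  (List.range n).foldl
    (fun res j => if (i >>> (n - 1 - j)) % 2 = 1 then res ++ [cs.getD j default] else res) acc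

def solve_alt (ip : String) (op : String) : List String :=
  let cs := ip.toList
  let n := cs.length
  (List.range (2 ^ n)).map (fun i => String.mk (bfold cs n i op.toList))

-- ===== PRECONDITION & SPEC =====
def Spec_solve (ip : String) (op : String) (out : List String) : Prop := out = solve_alt ip op
instance (ip : String) (op : String) (out : List String) : Decidable (Spec_solve ip op out) := by unfold Spec_solve; infer_instance

-- ===== CLAIM (what is proved, stated in full; the proofs are below) =====
def Claim_equal_solve : Prop := ∀ (ip : String) (op : String), Dom_solve ip op → Spec_solve ip op (solve ip op)

-- ===== LEMMAS AND PROOFS =====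

-- bits below position n are unaffected by adding 2^n
lemma shift_add_pow (k e n : Nat) (h : e < n) :
    ((2 ^ n + k) >>> e) % 2 = (k >>> e) % 2 := by
  rw [Nat.shiftRight_eq_div_pow, Nat.shiftRight_eq_div_pow]
  have h1 : 2 ^ n + k = k + 2 ^ e * 2 ^ (n - e) := by
    rw [← pow_add]
    have : e + (n - e) = n := by omega
    rw [this]; omega
  rw [h1, Nat.add_mul_div_left _ _ (Nat.two_pow_pos e)]
  have h2 : 2 ^ (n - e) = 2 * 2 ^ (n - e - 1) := by
    rw [← pow_succ']
    congr 1; omega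
  rw [h2, Nat.add_mul_mod_self_left]

lemma msb_low (i n : Nat) (h : i < 2 ^ n) : (i >>> n) % 2 = 0 := by
  rw [Nat.shiftRight_eq_div_pow, Nat.div_eq_of_lt h]

lemma msb_high (k n : Nat) (h : k < 2 ^ n) : ((2 ^ n + k) >>> n) % 2 = 1 := by
  rw [Nat.shiftRight_eq_div_pow, Nat.add_comm,
    Nat.add_div_right _ (Nat.two_pow_pos n), Nat.div_eq_of_lt h]

-- unfold one step of bfold over c :: rest
lemma bfold_cons (c : Char) (rest : List Char) (i : Nat) (acc : List Char) :
    bfold (c :: rest) (rest.length + 1) i acc =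
      bfold rest rest.length i
        (if (i >>> rest.length) % 2 = 1 then acc ++ [c] else acc) := by
  unfold bfold
  rw [List.range_succ_eq_map, List.foldl_cons, List.foldl_map]
  simp only [Nat.add_sub_cancel, Nat.sub_zero, List.getD_cons_succ, List.getD_cons_zero]
  congr 1
  funext res j
  have : rest.length - j.succ = rest.length - 1 - j := by omega
  rw [this]

lemma bfold_high (rest : List Char) (k : Nat) (acc : List Char) :
    bfold rest rest.length (2 ^ rest.length + k) acc = bfold rest rest.length k acc := by
  unfold bfold
  apply List.foldl_ext
  intro res j hj
  rw [List.mem_range] at hj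
  rw [shift_add_pow k (rest.length - 1 - j) rest.length (by omega)]

lemma solveAux_eq_bitmask (cs : List Char) (op : List Char) :
    solveAux cs op = (List.range (2 ^ cs.length)).map (fun i => bfold cs cs.length i op) := by
  induction cs generalizing op with
  | nil => simp [solveAux, bfold, ]
  | cons c rest ih =>
    have hsplit : (2 : Nat) ^ (c :: rest).length = 2 ^ rest.length + 2 ^ rest.length := by
      simp [List.length_cons, pow_succ]; ring
    rw [show solveAux (c :: rest) op = solveAux rest op ++ solveAux rest (op ++ [c]) from rfl,
      ih, ih, hsplit, List.range_add, List.map_append, List.map_map]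
    congr 1
    · apply List.map_congr_left
      intro i hi
      rw [List.mem_range] at hi
      have : (c :: rest).length = rest.length + 1 := rfl
      rw [this, bfold_cons, msb_low i rest.length hi]
      simp
    · apply List.map_congr_left
      intro k hk
      rw [List.mem_range] at hk
      have : (c :: rest).length = rest.length + 1 := rfl
      simp only [Function.comp]
      rw [this, bfold_cons, msb_high k rest.length hk]
      simp only [if_pos trivial]
      exact (bfold_high rest k (op ++ [c])).symm

-- ===== VERDICT (by name: the statement is the Claim_ definition above) =====
theorem solve_spec : Claim_equal_solve := by
  intro ip op _
  unfold Spec_solve solve solve_alt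
  rw [solveAux_eq_bitmask, List.map_map]
  rfl
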